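-- pv_equiv track=rewrite | github.com/muffindud/FLFA-Lab-Work | Grammar.py | eliminate_non_productive
-- ===== SOURCE A (Python) =====
-- def eliminate_non_productive(prod, vt):
--     productive = []
--     for p in prod.keys():
--         for s in prod[p]:
--             if all(c in vt for c in s):
--                 productive.append(p)
--
--     new_productive = True
--     while new_productive:
--         new_productive = False
--         for p in prod.keys():
--             for s in prod[p]:
--                 has_non_productive = False
--                 for c in s:
--                     if c in vt and c not in productive:
--                         has_non_productive = True
--                 if not has_non_productive:
--                     if p not in productive:
--                         productive.append(p)
--                         new_productive = True
--
--     for p in list(prod.keys()):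
--         if p not in productive:
--             del prod[p]
--
--     return prod, list(prod.keys())
-- ===== SOURCE B (Python) =====
-- # Worklist propagation: index every production by the grammar symbols that still
-- # block it, seed the productive set, and propagate through the index — instead of
-- # A's repeated full passes over the grammar with linear list-membership tests.
-- # Like A, this deletes the non-productive keys from `prod` in place.
-- def eliminate_non_productive(prod, vt):
--     vtset = set(vt)
--     productive = set()
--     queue = []
--     waiting = {}  # blocking symbol -> list of (producer, blockers) entries
--     for p, rhss in prod.items():
--         for s in rhss:
--             if all(c in vtset for c in s):
--                 if p not in productive:
--                     productive.add(p)
--                     queue.append(p)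
--             else:
--                 blockers = []
--                 for c in s:
--                     if c in vtset and c not in blockers:
--                         blockers.append(c)
--                 if not blockers:
--                     if p not in productive:
--                         productive.add(p)
--                         queue.append(p)
--                 else:
--                     for c in blockers:
--                         waiting.setdefault(c, []).append((p, blockers))
--     while queue:
--         x = queue.pop()
--         for p, blockers in waiting.get(x, []):
--             if p not in productive and all(c in productive for c in blockers):
--                 productive.add(p)
--                 queue.append(p)
--     for p in [q for q in list(prod.keys()) if q not in productive]:
--         del prod[p]
--     return prod, list(prod.keys())
-- ===== Notes on version B (the rewrite author's own statement) =====
-- stated objective: faster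
-- what changed: Replaces A's repeated whole-grammar passes with linear list-membership tests by a single pass that indexes each production under the symbols still blocking it, followed by a worklist propagation over sets: each production is revisited only when one of its blockers becomes productive.
import Mathlib
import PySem

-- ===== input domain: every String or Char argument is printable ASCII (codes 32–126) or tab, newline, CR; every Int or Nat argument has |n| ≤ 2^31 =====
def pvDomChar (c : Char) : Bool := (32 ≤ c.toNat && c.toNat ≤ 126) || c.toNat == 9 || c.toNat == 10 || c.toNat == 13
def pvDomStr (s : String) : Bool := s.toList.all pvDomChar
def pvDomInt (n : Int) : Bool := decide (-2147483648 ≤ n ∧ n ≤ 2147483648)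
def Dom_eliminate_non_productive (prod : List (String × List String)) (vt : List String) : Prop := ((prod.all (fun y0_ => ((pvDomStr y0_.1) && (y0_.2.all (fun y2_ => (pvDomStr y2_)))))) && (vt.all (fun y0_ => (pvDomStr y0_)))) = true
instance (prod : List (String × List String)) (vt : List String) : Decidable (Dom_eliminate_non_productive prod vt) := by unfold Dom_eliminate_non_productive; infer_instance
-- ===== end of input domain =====

-- B replaces A's repeated whole-grammar passes (with linear list-membership tests) by a
-- one-pass index of productions keyed by their blocking symbols plus a worklist
-- propagation over sets (objective: faster).  Both Pythons mutate `prod` in place by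
-- deleting its non-productive keys; the equivalence proved here is about the return
-- value (which contains that same mutated dict).

-- Shared helper: a single Python character `c` used as the string `c` in `c in vt` etc.
def pvSg (c : Char) : String := String.singleton c

-- number of strings in `os` not yet members of `P` — the termination measure of both
-- while loops (cited by their `decreasing_by`)
def pvCnt (os : List String) (P : List String) : Nat := os.countP (fun p => decide (p ∉ P))

lemma pvCnt_le {os P P' : List String} (h : ∀ x, x ∈ P → x ∈ P') : pvCnt os P' ≤ pvCnt os P :=
  List.countP_mono_left (fun a _ hd => by
    simp only [decide_eq_true_eq] at hd ⊢
    exact fun hc => hd (h a hc))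

lemma pvCnt_lt {os P P' : List String} (h : ∀ x, x ∈ P → x ∈ P') (a : String)
    (ha : a ∈ os) (haP : a ∉ P) (haP' : a ∈ P') : pvCnt os P' < pvCnt os P := by
  induction os with
  | nil => simp at ha
  | cons o os ih =>
    have hle : pvCnt os P' ≤ pvCnt os P := pvCnt_le h
    unfold pvCnt at *
    simp only [List.countP_cons]
    rcases List.mem_cons.mp ha with rfl | ha'
    · have h1 : (if (decide (a ∉ P') : Bool) = true then (1:Nat) else 0) = 0 := by simp [haP']
      have h2 : (if (decide (a ∉ P) : Bool) = true then (1:Nat) else 0) = 1 := by simp [haP]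
      omega
    · have hlt := ih ha'
      have hone : (if (decide (o ∉ P') : Bool) = true then (1:Nat) else 0) ≤
          (if (decide (o ∉ P) : Bool) = true then (1:Nat) else 0) := by
        by_cases hP : o ∈ P
        · simp [hP, h o hP]
        · simp only [hP]
          split <;> simp
      omega

-- ===== PORT A =====
-- A receives `prod` as a Python dict: it is read through PySem.Dict.ofList and the two
-- loops over `prod.keys()` with lookups `prod[p]` are folds over its (key, value) items.

-- "all(c in vt for c in s)"
def pvAllTerm (vt : List String) (s : String) : Bool := s.toList.all (fun c => vt.contains (pvSg c))

-- first double loop of A building `productive` (appends, possibly with duplicates)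
def pvInitA (L : List (String × List String)) (vt : List String) : List String :=
  L.foldl (fun acc pr => pr.2.foldl (fun acc s => if pvAllTerm vt s then acc ++ [pr.1] else acc) acc) []

-- the inner `for c in s` loop computing has_non_productive
def pvHasNP (vt productive : List String) (s : String) : Bool :=
  s.toList.foldl (fun h c => if vt.contains (pvSg c) && !(productive.contains (pvSg c)) then true else h) false

-- one full body of the `while new_productive` loop: state = (productive, new_productive)
def pvPassA (L : List (String × List String)) (vt : List String) (st : List String × Bool) :
    List String × Bool :=
  L.foldl (fun st pr => pr.2.foldl (fun st s =>
      if pvHasNP vt st.1 s then st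
      else if st.1.contains pr.1 then st
      else (st.1 ++ [pr.1], true)) st) st

-- monotonicity/progress of a pass (needed by pvWhileA's decreasing_by)
def pvMonoF (os : List String) (st st' : List String × Bool) : Prop :=
  (∀ x, x ∈ st.1 → x ∈ st'.1) ∧
  (st'.2 = true → st.2 = true ∨ ∃ a ∈ os, a ∉ st.1 ∧ a ∈ st'.1)

lemma pvMonoF_rfl (os : List String) (st : List String × Bool) : pvMonoF os st st :=
  ⟨fun _ h => h, fun h => Or.inl h⟩

lemma pvMonoF_trans {os : List String} {st st' st'' : List String × Bool}
    (h1 : pvMonoF os st st') (h2 : pvMonoF os st' st'') : pvMonoF os st st'' := by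
  refine ⟨fun x hx => h2.1 x (h1.1 x hx), fun hf => ?_⟩
  rcases h2.2 hf with hf' | ⟨a, ha, hni, hin⟩
  · rcases h1.2 hf' with h | ⟨a, ha, hni, hin⟩
    · exact Or.inl h
    · exact Or.inr ⟨a, ha, hni, h2.1 a hin⟩
  · exact Or.inr ⟨a, ha, fun hc => hni (h1.1 a hc), hin⟩

lemma pvPassA_inner_mono (os : List String) (vt : List String) (p : String) (hp : p ∈ os)
    (ss : List String) : ∀ st, pvMonoF os st (ss.foldl (fun st s =>
      if pvHasNP vt st.1 s then st
      else if st.1.contains p then st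
      else (st.1 ++ [p], true)) st) := by
  induction ss with
  | nil => exact fun st => pvMonoF_rfl os st
  | cons s ss ih =>
    intro st
    simp only [List.foldl_cons]
    by_cases h1 : pvHasNP vt st.1 s = true
    · have hstep : (if pvHasNP vt st.1 s = true then st
          else if st.1.contains p = true then st else (st.1 ++ [p], true)) = st := by simp [h1]
      rw [hstep]; exact ih st
    · by_cases h2 : p ∈ st.1
      · have hstep : (if pvHasNP vt st.1 s = true then st
            else if st.1.contains p = true then st else (st.1 ++ [p], true)) = st := by
          simp [h1, h2]
        rw [hstep]; exact ih st
      · have hstep : (if pvHasNP vt st.1 s = true then st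
            else if st.1.contains p = true then st else (st.1 ++ [p], true)) =
            (st.1 ++ [p], true) := by simp [h1, h2]
        rw [hstep]
        refine pvMonoF_trans ?_ (ih _)
        exact ⟨fun x hx => by simp [hx], fun _ => Or.inr ⟨p, hp, h2, by simp⟩⟩

lemma pvPassA_mono (L : List (String × List String)) (vt : List String)
    (st : List String × Bool) : pvMonoF (L.map Prod.fst) st (pvPassA L vt st) := by
  unfold pvPassA
  have main : ∀ (M : List (String × List String)), (∀ pr ∈ M, pr.1 ∈ L.map Prod.fst) →
      ∀ st, pvMonoF (L.map Prod.fst) st (M.foldl (fun st pr => pr.2.foldl (fun st s =>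
        if pvHasNP vt st.1 s then st
        else if st.1.contains pr.1 then st
        else (st.1 ++ [pr.1], true)) st) st) := by
    intro M
    induction M with
    | nil => exact fun _ st => pvMonoF_rfl _ st
    | cons pr M ih =>
      intro hM st
      simp only [List.foldl_cons]
      refine pvMonoF_trans (pvPassA_inner_mono _ vt pr.1 (hM pr (by simp)) pr.2 st)
        (ih (fun q hq => hM q (by simp [hq])) _)
  exact main L (fun pr hpr => List.mem_map_of_mem hpr) st

-- the `while new_productive:` loop; terminates because a pass with the flag set has
-- added a key of L not previously in `productive` (pvPassA_mono, pvCnt_lt)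
def pvWhileA (L : List (String × List String)) (vt : List String) (productive : List String) :
    List String :=
  if h : (pvPassA L vt (productive, false)).2 = true then
    pvWhileA L vt (pvPassA L vt (productive, false)).1
  else (pvPassA L vt (productive, false)).1
termination_by pvCnt (L.map Prod.fst) productive
decreasing_by
  rcases (pvPassA_mono L vt (productive, false)).2 h with h' | ⟨a, ha, hni, hin⟩
  · simp at h'
  · exact pvCnt_lt (pvPassA_mono L vt (productive, false)).1 a ha hni hin

def eliminate_non_productive (prod : List (String × List String)) (vt : List String) :
    (List (String × List String)) × List String :=
  let L := (PySem.Dict.ofList prod).items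
  let productive := pvWhileA L vt (pvInitA L vt)
  -- `for p in list(prod.keys()): if p not in productive: del prod[p]` — the keys of a
  -- dict are distinct, so the deletions leave exactly the items whose key is productive
  let L' := L.filter (fun pr => pr.1 ∈ productive)
  (L', L'.map Prod.fst)

-- ===== PORT B =====
-- transliteration of Source B (same dict reading of `prod`; `set(vt)` via PySem.Set.ofList)

-- the `blockers` loop of Source B: distinct characters of s that are in vtset, in order
def pvBlockers (vtset : PySem.Set String) (s : String) : List Char :=
  s.toList.foldl (fun b c => if PySem.Set.contains vtset (pvSg c) && !(b.contains c) then b ++ [c] else b) []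

-- `for c in blockers: waiting.setdefault(c, []).append((p, blockers))`
def pvRecord (p : String) (bs : List Char) (W : PySem.Dict String (List (String × List Char))) :
    PySem.Dict String (List (String × List Char)) :=
  bs.foldl (fun W c => W.insert (pvSg c) (W.getD (pvSg c) [] ++ [(p, bs)])) W

-- the building double loop of Source B; state = (productive, queue, waiting)
def pvBuildB (L : List (String × List String)) (vtset : PySem.Set String) :
    PySem.Set String × List String × PySem.Dict String (List (String × List Char)) :=
  L.foldl (fun st pr => pr.2.foldl (fun st s =>
      if s.toList.all (fun c => PySem.Set.contains vtset (pvSg c)) then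
        if PySem.Set.contains st.1 pr.1 then st
        else (PySem.Set.add st.1 pr.1, st.2.1 ++ [pr.1], st.2.2)
      else
        if pvBlockers vtset s = [] then
          if PySem.Set.contains st.1 pr.1 then st
          else (PySem.Set.add st.1 pr.1, st.2.1 ++ [pr.1], st.2.2)
        else (st.1, st.2.1, pvRecord pr.1 (pvBlockers vtset s) st.2.2)) st)
    (PySem.Set.empty, [], PySem.Dict.empty)

-- body of `for p, blockers in waiting.get(x, []):`
def pvFireB (st : PySem.Set String × List String) (e : String × List Char) :
    PySem.Set String × List String :=
  if !(PySem.Set.contains st.1 e.1) && e.2.all (fun c => PySem.Set.contains st.1 (pvSg c)) then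
    (PySem.Set.add st.1 e.1, st.2 ++ [e.1])
  else st

def pvOwners (W : PySem.Dict String (List (String × List Char))) : List String :=
  W.items.flatMap (fun kv => kv.2.map Prod.fst)

lemma pvOwner_of_mem_getD {W : PySem.Dict String (List (String × List Char))} {k : String}
    {e : String × List Char} (h : e ∈ W.getD k []) : e.1 ∈ pvOwners W := by
  rw [PySem.Dict.getD_eq_get?_getD] at h
  cases hg : W.get? k with
  | none => rw [hg] at h; simp at h
  | some l =>
    rw [hg] at h
    simp only [Option.getD_some] at h
    have hit := PySem.Dict.mem_items_of_get?_eq_some W hg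
    unfold pvOwners
    exact List.mem_flatMap.mpr ⟨(k, l), hit, List.mem_map_of_mem h⟩

-- measure facts about one round of firings (cited by pvWhileB's decreasing_by)
lemma pvFireB_fold_meas (os : List String) (l : List (String × List Char))
    (hl : ∀ e ∈ l, e.1 ∈ os) (P : PySem.Set String) (q : List String) :
    (∀ x, x ∈ P → x ∈ (l.foldl pvFireB (P, q)).1) ∧
    (l.foldl pvFireB (P, q)).2.length + pvCnt os (l.foldl pvFireB (P, q)).1 ≤
      q.length + pvCnt os P := by
  induction l generalizing P q with
  | nil => exact ⟨fun _ h => h, le_rfl⟩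
  | cons e l ih =>
    simp only [List.foldl_cons]
    by_cases hc : (!(PySem.Set.contains P e.1) &&
        e.2.all (fun c => PySem.Set.contains P (pvSg c))) = true
    · have hstep : pvFireB (P, q) e = (PySem.Set.add P e.1, q ++ [e.1]) := by
        unfold pvFireB; rw [if_pos hc]
      rw [hstep]
      have hnotmem : e.1 ∉ P := by
        have := (Bool.and_eq_true _ _).mp hc |>.1
        intro hm
        rw [(PySem.Set.contains_iff P e.1).mpr hm] at this
        simp at this
      have hmono : ∀ x, x ∈ P → x ∈ PySem.Set.add P e.1 :=
        fun x hx => (PySem.Set.mem_add P e.1 x).mpr (Or.inl hx)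
      have hcnt : pvCnt os (PySem.Set.add P e.1) < pvCnt os P :=
        pvCnt_lt hmono e.1 (hl e (by simp)) hnotmem
          ((PySem.Set.mem_add P e.1 e.1).mpr (Or.inr rfl))
      have ihh := ih (fun e' he' => hl e' (by simp [he'])) (PySem.Set.add P e.1) (q ++ [e.1])
      refine ⟨fun x hx => ihh.1 x (hmono x hx), ?_⟩
      have := ihh.2
      simp only [List.length_append, List.length_cons, List.length_nil] at this
      omega
    · have hstep : pvFireB (P, q) e = (P, q) := by
        unfold pvFireB; rw [if_neg (by simpa using hc)]
      rw [hstep]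
      exact ih (fun e' he' => hl e' (by simp [he'])) P q

-- `while queue:` with `x = queue.pop()` (pop from the end)
def pvWhileB (W : PySem.Dict String (List (String × List Char))) (P : PySem.Set String)
    (Q : List String) : PySem.Set String :=
  if hQ : Q = [] then P
  else
    pvWhileB W ((W.getD (Q.getLast hQ) []).foldl pvFireB (P, Q.dropLast)).1
      ((W.getD (Q.getLast hQ) []).foldl pvFireB (P, Q.dropLast)).2
termination_by Q.length + pvCnt (pvOwners W) P
decreasing_by
  have h := pvFireB_fold_meas (pvOwners W) (W.getD (Q.getLast hQ) [])
    (fun e he => pvOwner_of_mem_getD he) P Q.dropLast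
  have hlen : Q.dropLast.length + 1 = Q.length := by
    have h1 : Q.dropLast.length = Q.length - 1 := List.length_dropLast
    have h2 : Q.length ≠ 0 := fun hz => hQ (List.length_eq_zero_iff.mp hz)
    omega
  omega

def eliminate_non_productive_alt (prod : List (String × List String)) (vt : List String) :
    (List (String × List String)) × List String :=
  let L := (PySem.Dict.ofList prod).items
  let vtset := PySem.Set.ofList vt
  let st := pvBuildB L vtset
  let Pf := pvWhileB st.2.2 st.1 st.2.1
  let L' := L.filter (fun pr => PySem.Set.contains Pf pr.1)
  (L', L'.map Prod.fst)

-- ===== PRECONDITION & SPEC =====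
def Spec_eliminate_non_productive (prod : List (String × List String)) (vt : List String) (out : (List (String × List String)) × List String) : Prop := out = eliminate_non_productive_alt prod vt
instance (prod : List (String × List String)) (vt : List String) (out : (List (String × List String)) × List String) : Decidable (Spec_eliminate_non_productive prod vt out) := by unfold Spec_eliminate_non_productive; infer_instance

-- ===== CLAIM (what is proved, stated in full; the proofs are below) =====
def Claim_equal_eliminate_non_productive : Prop := ∀ (prod : List (String × List String)) (vt : List String), Dom_eliminate_non_productive prod vt → Spec_eliminate_non_productive prod vt (eliminate_non_productive prod vt)

-- ===== LEMMAS AND PROOFS =====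

-- the productive symbols of the grammar L, as a least fixed point: `seed` is A's first
-- loop (a right-hand side made of terminals only), `step` is the rule both loops close
-- under (every terminal character of some right-hand side is already productive)
inductive pvProductive (L : List (String × List String)) (vt : List String) : String → Prop
  | seed (p : String) (ss : List String) (s : String) : (p, ss) ∈ L → s ∈ ss →
      (∀ c ∈ s.toList, pvSg c ∈ vt) → pvProductive L vt p
  | step (p : String) (ss : List String) (s : String) : (p, ss) ∈ L → s ∈ ss →
      (∀ c ∈ s.toList, pvSg c ∈ vt → pvProductive L vt (pvSg c)) → pvProductive L vt p

-- ======== A-side ========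

-- membership in the list built by A's first double loop
lemma pvInitA_mem (L : List (String × List String)) (vt : List String) (x : String) :
    x ∈ pvInitA L vt ↔ ∃ pr ∈ L, x = pr.1 ∧ ∃ s ∈ pr.2, pvAllTerm vt s = true := by
  unfold pvInitA
  have hinner : ∀ (pr : String × List String) (acc : List String),
      pr.2.foldl (fun acc s => if pvAllTerm vt s then acc ++ [pr.1] else acc) acc =
        acc ++ (pr.2.filter (pvAllTerm vt)).map (fun _ => pr.1) :=
    fun pr acc => PySem.List.foldl_append_if (pvAllTerm vt) (fun _ => pr.1) pr.2 acc
  have hfun : (fun (acc : List String) (pr : String × List String) =>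
      pr.2.foldl (fun acc s => if pvAllTerm vt s then acc ++ [pr.1] else acc) acc) =
      (fun acc pr => acc ++ (pr.2.filter (pvAllTerm vt)).map (fun _ => pr.1)) :=
    funext fun acc => funext fun pr => hinner pr acc
  rw [hfun, PySem.List.foldl_append_eq_flatMap]
  simp only [List.nil_append, List.mem_flatMap, List.mem_map, List.mem_filter]
  constructor
  · rintro ⟨pr, hpr, ⟨s, ⟨hs, hall⟩, rfl⟩⟩
    exact ⟨pr, hpr, rfl, s, hs, hall⟩
  · rintro ⟨pr, hpr, rfl, s, hs, hall⟩
    exact ⟨pr, hpr, s, ⟨hs, hall⟩, rfl⟩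

-- the has_non_productive loop as a predicate on the current productive list
lemma pvHasNP_false_iff (vt P : List String) (s : String) :
    pvHasNP vt P s = false ↔ ∀ c ∈ s.toList, pvSg c ∈ vt → pvSg c ∈ P := by
  unfold pvHasNP
  have hfold : ∀ (g : Char → Bool) (cs : List Char) (b : Bool),
      cs.foldl (fun h c => if g c then true else h) b = (b || cs.any g) := by
    intro g cs
    induction cs with
    | nil => simp
    | cons c cs ih =>
      intro b
      simp only [List.foldl_cons, List.any_cons]
      rw [ih]
      cases hg : g c <;> cases b <;> simp_all
  rw [hfold]
  simp

lemma pvAllTerm_iff (vt : List String) (s : String) :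
    pvAllTerm vt s = true ↔ ∀ c ∈ s.toList, pvSg c ∈ vt := by
  unfold pvAllTerm
  simp

-- relation describing what a (partial) pass over the pair list M does to the state
def pvARel (L : List (String × List String)) (vt : List String)
    (M : List (String × List String)) (st st' : List String × Bool) : Prop :=
  (∀ x, x ∈ st.1 → x ∈ st'.1) ∧
  ((∀ x ∈ st.1, pvProductive L vt x) → (∀ x ∈ st'.1, pvProductive L vt x)) ∧
  (st'.2 = false → st.2 = false ∧ st'.1 = st.1) ∧
  (st'.2 = false → ∀ pr ∈ M, ∀ s ∈ pr.2, pvHasNP vt st.1 s = false → pr.1 ∈ st.1)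

lemma pvARel_rfl (L : List (String × List String)) (vt : List String)
    (st : List String × Bool) : pvARel L vt [] st st :=
  ⟨fun _ h => h, fun h => h, fun h => ⟨h, rfl⟩, fun _ pr hpr => by simp at hpr⟩

lemma pvARel_trans {L : List (String × List String)} {vt : List String}
    {M1 M2 : List (String × List String)} {st st' st'' : List String × Bool}
    (h1 : pvARel L vt M1 st st') (h2 : pvARel L vt M2 st' st'') :
    pvARel L vt (M1 ++ M2) st st'' := by
  refine ⟨fun x hx => h2.1 x (h1.1 x hx), fun hp => h2.2.1 (h1.2.1 hp), ?_, ?_⟩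
  · intro hf
    obtain ⟨hf', heq'⟩ := h2.2.2.1 hf
    obtain ⟨hf0, heq0⟩ := h1.2.2.1 hf'
    exact ⟨hf0, heq'.trans heq0⟩
  · intro hf pr hpr s hs hnp
    obtain ⟨hf', heq'⟩ := h2.2.2.1 hf
    obtain ⟨hf0, heq0⟩ := h1.2.2.1 hf'
    rcases List.mem_append.mp hpr with hpr1 | hpr2
    · exact h1.2.2.2 hf' pr hpr1 s hs hnp
    · have := h2.2.2.2 hf pr hpr2 s hs (by rwa [heq0])
      rwa [heq0] at this

-- effect of processing one right-hand side s of the pair pr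
lemma pvAStep (L : List (String × List String)) (vt : List String)
    (pr : String × List String) (hpr : pr ∈ L) (s : String) (hs : s ∈ pr.2)
    (st : List String × Bool) :
    pvARel L vt [(pr.1, [s])] st
      (if pvHasNP vt st.1 s then st
       else if st.1.contains pr.1 then st else (st.1 ++ [pr.1], true)) := by
  by_cases h1 : pvHasNP vt st.1 s = true
  · rw [if_pos h1]
    refine ⟨fun _ h => h, fun h => h, fun h => ⟨h, rfl⟩, ?_⟩
    intro _ pr' hpr' s' hs' hnp
    simp only [List.mem_singleton] at hpr'
    subst hpr'
    simp only [List.mem_singleton] at hs'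
    subst hs'
    rw [h1] at hnp
    exact absurd hnp (by simp)
  · rw [if_neg h1]
    by_cases h2 : pr.1 ∈ st.1
    · rw [if_pos (by simpa using h2)]
      refine ⟨fun _ h => h, fun h => h, fun h => ⟨h, rfl⟩, ?_⟩
      intro _ pr' hpr' s' hs' _
      simp only [List.mem_singleton] at hpr'
      subst hpr'
      exact h2
    · rw [if_neg (by simpa using h2)]
      refine ⟨fun x hx => by simp [hx], ?_, by simp, by simp⟩
      intro hp x hx
      rcases List.mem_append.mp hx with hx1 | hx2
      · exact hp x hx1
      · simp only [List.mem_singleton] at hx2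
        subst hx2
        refine pvProductive.step pr.1 pr.2 s (by simpa using hpr) hs ?_
        intro c hc hcv
        have hnp := (pvHasNP_false_iff vt st.1 s).mp (by simpa using h1) c hc hcv
        exact hp _ hnp

-- a full pass relates the state to its result
lemma pvPassA_rel (L : List (String × List String)) (vt : List String)
    (st : List String × Bool) : pvARel L vt L st (pvPassA L vt st) := by
  unfold pvPassA
  have inner : ∀ (pr : String × List String), pr ∈ L → ∀ (ss : List String),
      (∀ s ∈ ss, s ∈ pr.2) → ∀ st, pvARel L vt [(pr.1, ss)] st
        (ss.foldl (fun st s =>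
          if pvHasNP vt st.1 s then st
          else if st.1.contains pr.1 then st else (st.1 ++ [pr.1], true)) st) := by
    intro pr hpr ss
    induction ss with
    | nil =>
      intro _ st
      refine ⟨fun _ h => h, fun h => h, fun h => ⟨h, rfl⟩, ?_⟩
      intro _ pr' hpr' s' hs' _
      simp only [List.mem_singleton] at hpr'
      subst hpr'
      simp at hs'
    | cons s ss ih =>
      intro hss st
      simp only [List.foldl_cons]
      have h1 := pvAStep L vt pr hpr s (hss s (by simp)) st
      have h2 := ih (fun s' hs' => hss s' (by simp [hs']))
        (if pvHasNP vt st.1 s then st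
         else if st.1.contains pr.1 then st else (st.1 ++ [pr.1], true))
      have h12 := pvARel_trans h1 h2
      -- merge [(pr.1,[s])] ++ [(pr.1,ss)] into [(pr.1, s::ss)]
      refine ⟨h12.1, h12.2.1, h12.2.2.1, ?_⟩
      intro hf pr' hpr' s' hs' hnp
      simp only [List.mem_singleton] at hpr'
      subst hpr'
      simp only at hs'
      rcases List.mem_cons.mp hs' with rfl | hs''
      · exact h12.2.2.2 hf (pr.1, [s']) (by simp) s' (by simp) hnp
      · exact h12.2.2.2 hf (pr.1, ss) (by simp) s' hs'' hnp
  have outer : ∀ (M : List (String × List String)), (∀ pr ∈ M, pr ∈ L) →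
      ∀ st, pvARel L vt M st (M.foldl (fun st pr => pr.2.foldl (fun st s =>
        if pvHasNP vt st.1 s then st
        else if st.1.contains pr.1 then st else (st.1 ++ [pr.1], true)) st) st) := by
    intro M
    induction M with
    | nil => exact fun _ st => pvARel_rfl L vt st
    | cons pr M ih =>
      intro hM st
      simp only [List.foldl_cons]
      have h1 := inner pr (hM pr (by simp)) pr.2 (fun _ h => h) st
      have h2 := ih (fun q hq => hM q (by simp [hq]))
        (pr.2.foldl (fun st s =>
          if pvHasNP vt st.1 s then st
          else if st.1.contains pr.1 then st else (st.1 ++ [pr.1], true)) st)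
      have h12 := pvARel_trans h1 h2
      refine ⟨h12.1, h12.2.1, h12.2.2.1, ?_⟩
      intro hf pr' hpr' s' hs' hnp
      rcases List.mem_cons.mp hpr' with rfl | hpr''
      · exact h12.2.2.2 hf (pr'.1, pr'.2) (by simp) s' hs' hnp
      · exact h12.2.2.2 hf pr' (by simp [hpr'']) s' hs' hnp
  exact outer L (fun _ h => h) st

-- full specification of the while loop
lemma pvWhileA_spec (L : List (String × List String)) (vt : List String) (P : List String) :
    (∀ x, x ∈ P → x ∈ pvWhileA L vt P) ∧
    ((∀ x ∈ P, pvProductive L vt x) → (∀ x ∈ pvWhileA L vt P, pvProductive L vt x)) ∧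
    (∀ pr ∈ L, ∀ s ∈ pr.2, pvHasNP vt (pvWhileA L vt P) s = false → pr.1 ∈ pvWhileA L vt P) := by
  induction P using pvWhileA.induct L vt with
  | case1 P hflag ih =>
    rw [pvWhileA]
    rw [dif_pos hflag]
    have hrel := pvPassA_rel L vt (P, false)
    exact ⟨fun x hx => ih.1 x (hrel.1 x hx),
      fun hp => ih.2.1 (hrel.2.1 hp), ih.2.2⟩
  | case2 P hflag =>
    rw [pvWhileA]
    rw [dif_neg hflag]
    have hrel := pvPassA_rel L vt (P, false)
    have heq := hrel.2.2.1 (by simpa using hflag)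
    refine ⟨fun x hx => by rw [heq.2]; exact hx, fun hp => by rw [heq.2]; exact hp, ?_⟩
    intro pr hpr s hs hnp
    rw [heq.2] at hnp ⊢
    exact hrel.2.2.2 (by simpa using hflag) pr hpr s hs hnp

lemma pvA_iff (L : List (String × List String)) (vt : List String) (x : String) :
    x ∈ pvWhileA L vt (pvInitA L vt) ↔ pvProductive L vt x := by
  constructor
  · intro hx
    refine (pvWhileA_spec L vt (pvInitA L vt)).2.1 ?_ x hx
    intro y hy
    obtain ⟨pr, hpr, rfl, s, hs, hall⟩ := (pvInitA_mem L vt y).mp hy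
    exact pvProductive.seed pr.1 pr.2 s (by simpa using hpr) hs ((pvAllTerm_iff vt s).mp hall)
  · intro hx
    induction hx with
    | seed p ss s hpr hs hall =>
      exact (pvWhileA_spec L vt (pvInitA L vt)).1 p
        ((pvInitA_mem L vt p).mpr ⟨(p, ss), hpr, rfl, s, hs, (pvAllTerm_iff vt s).mpr hall⟩)
    | step p ss s hpr hs hprem ih =>
      refine (pvWhileA_spec L vt (pvInitA L vt)).2.2 (p, ss) hpr s hs ?_
      exact (pvHasNP_false_iff vt _ s).mpr (fun c hc hcv => ih c hc hcv)

-- ======== B-side ========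

lemma pvVts (vt : List String) (y : String) :
    PySem.Set.contains (PySem.Set.ofList vt) y = true ↔ y ∈ vt :=
  (PySem.Set.contains_iff _ _).trans (PySem.Set.mem_ofList vt y)

-- membership in the `blockers` list
lemma pvBlockers_fold_mem (g : Char → Bool) (cs : List Char) : ∀ (b : List Char) (x : Char),
    x ∈ cs.foldl (fun b c => if g c && !(b.contains c) then b ++ [c] else b) b ↔
      x ∈ b ∨ (x ∈ cs ∧ g x = true) := by
  induction cs with
  | nil => simp
  | cons c cs ih =>
    intro b x
    simp only [List.foldl_cons]
    rw [ih]
    by_cases hgc : (g c && !(b.contains c)) = true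
    · rw [if_pos hgc]
      have hg : g c = true := ((Bool.and_eq_true _ _).mp hgc).1
      constructor
      · rintro (hb | ⟨hcs, hgx⟩)
        · rcases List.mem_append.mp hb with hb2 | hc2
          · exact Or.inl hb2
          · simp only [List.mem_singleton] at hc2; subst hc2
            exact Or.inr ⟨by simp, hg⟩
        · exact Or.inr ⟨by simp [hcs], hgx⟩
      · rintro (hb | ⟨hccs, hgx⟩)
        · exact Or.inl (List.mem_append.mpr (Or.inl hb))
        · rcases List.mem_cons.mp hccs with rfl | hcs
          · exact Or.inl (by simp)
          · exact Or.inr ⟨hcs, hgx⟩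
    · rw [if_neg hgc]
      have hcb : g c = true → c ∈ b := by
        intro hg
        by_contra hnb
        exact hgc (by simp [hg, hnb])
      constructor
      · rintro (hb | ⟨hcs, hgx⟩)
        · exact Or.inl hb
        · exact Or.inr ⟨by simp [hcs], hgx⟩
      · rintro (hb | ⟨hccs, hgx⟩)
        · exact Or.inl hb
        · rcases List.mem_cons.mp hccs with rfl | hcs
          · exact Or.inl (hcb hgx)
          · exact Or.inr ⟨hcs, hgx⟩

lemma pvBlockers_mem (vtset : PySem.Set String) (s : String) (x : Char) :
    x ∈ pvBlockers vtset s ↔ x ∈ s.toList ∧ PySem.Set.contains vtset (pvSg x) = true := by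
  unfold pvBlockers
  rw [pvBlockers_fold_mem]
  simp

-- `waiting.setdefault(c, []).append(e)` lemmas (over an arbitrary fold list l)
lemma pvRecord_fold_mono (p : String) (bs : List Char) (l : List Char) :
    ∀ (W : PySem.Dict String (List (String × List Char))) (k : String) (e : String × List Char),
      e ∈ W.getD k [] →
      e ∈ (l.foldl (fun W c => W.insert (pvSg c) (W.getD (pvSg c) [] ++ [(p, bs)])) W).getD k [] := by
  induction l with
  | nil => exact fun _ _ _ h => h
  | cons c l ih =>
    intro W k e he
    simp only [List.foldl_cons]
    refine ih _ k e ?_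
    rw [PySem.Dict.getD_insert]
    split
    · next heq => subst heq; simp [he]
    · exact he

lemma pvRecord_fold_new (p : String) (bs : List Char) (l : List Char) :
    ∀ (W : PySem.Dict String (List (String × List Char))) (k : String) (e : String × List Char),
      e ∈ (l.foldl (fun W c => W.insert (pvSg c) (W.getD (pvSg c) [] ++ [(p, bs)])) W).getD k [] →
      e ∈ W.getD k [] ∨ e = (p, bs) := by
  induction l with
  | nil => exact fun _ _ _ h => Or.inl h
  | cons c l ih =>
    intro W k e he
    simp only [List.foldl_cons] at he
    rcases ih _ k e he with h | h
    · rw [PySem.Dict.getD_insert] at h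
      split at h
      · next heq =>
        subst heq
        rcases List.mem_append.mp h with h2 | h2
        · exact Or.inl h2
        · simp only [List.mem_singleton] at h2; exact Or.inr h2
      · exact Or.inl h
    · exact Or.inr h

lemma pvRecord_fold_reg (p : String) (bs : List Char) (l : List Char) :
    ∀ (W : PySem.Dict String (List (String × List Char))) (c : Char), c ∈ l →
      (p, bs) ∈ (l.foldl (fun W c => W.insert (pvSg c) (W.getD (pvSg c) [] ++ [(p, bs)])) W).getD (pvSg c) [] := by
  induction l with
  | nil => intro _ c h; simp at h
  | cons c0 l ih =>
    intro W c hc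
    simp only [List.foldl_cons]
    rcases List.mem_cons.mp hc with rfl | hc'
    · refine pvRecord_fold_mono p bs l _ _ _ ?_
      rw [PySem.Dict.getD_insert, if_pos rfl]
      simp
    · exact ih _ c hc'

-- an entry of `waiting` always comes from an actual production
def pvEntryOK (L : List (String × List String)) (vt : List String)
    (e : String × List Char) : Prop :=
  ∃ pr ∈ L, ∃ s ∈ pr.2, e.1 = pr.1 ∧ e.2 = pvBlockers (PySem.Set.ofList vt) s ∧ e.2 ≠ []

-- every entry is filed under each of its blockers
def pvWReg (W : PySem.Dict String (List (String × List Char))) : Prop :=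
  ∀ (k : String) (e : String × List Char), e ∈ W.getD k [] → ∀ c ∈ e.2, e ∈ W.getD (pvSg c) []

-- what processing the pair list M of the building loop does to the state
def pvBRel (L : List (String × List String)) (vt : List String)
    (M : List (String × List String))
    (st st' : PySem.Set String × List String × PySem.Dict String (List (String × List Char))) : Prop :=
  (∀ x, x ∈ st.1 → x ∈ st'.1) ∧
  ((∀ x : String, x ∈ st.1 ↔ x ∈ st.2.1) → (∀ x : String, x ∈ st'.1 ↔ x ∈ st'.2.1)) ∧
  ((∀ x ∈ st.1, pvProductive L vt x) → ∀ x ∈ st'.1, pvProductive L vt x) ∧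
  (∀ k e, e ∈ st.2.2.getD k [] → e ∈ st'.2.2.getD k []) ∧
  (∀ k e, e ∈ st'.2.2.getD k [] → e ∈ st.2.2.getD k [] ∨ pvEntryOK L vt e) ∧
  (pvWReg st.2.2 → pvWReg st'.2.2) ∧
  (∀ pr ∈ M, ∀ s ∈ pr.2,
    (s.toList.all (fun c => PySem.Set.contains (PySem.Set.ofList vt) (pvSg c)) = true ∨
      pvBlockers (PySem.Set.ofList vt) s = []) → pr.1 ∈ st'.1) ∧
  (∀ pr ∈ M, ∀ s ∈ pr.2, pvBlockers (PySem.Set.ofList vt) s ≠ [] →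
    ¬ (s.toList.all (fun c => PySem.Set.contains (PySem.Set.ofList vt) (pvSg c)) = true) →
    ∀ c ∈ pvBlockers (PySem.Set.ofList vt) s,
      (pr.1, pvBlockers (PySem.Set.ofList vt) s) ∈ st'.2.2.getD (pvSg c) [])

lemma pvBRel_rfl (L : List (String × List String)) (vt : List String)
    (st : PySem.Set String × List String × PySem.Dict String (List (String × List Char))) :
    pvBRel L vt [] st st :=
  ⟨fun _ h => h, fun h => h, fun h => h, fun _ _ h => h, fun _ _ h => Or.inl h, fun h => h,
    fun pr hpr => by simp at hpr, fun pr hpr => by simp at hpr⟩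

lemma pvBRel_trans {L : List (String × List String)} {vt : List String}
    {M1 M2 : List (String × List String)}
    {st st' st'' : PySem.Set String × List String × PySem.Dict String (List (String × List Char))}
    (h1 : pvBRel L vt M1 st st') (h2 : pvBRel L vt M2 st' st'') :
    pvBRel L vt (M1 ++ M2) st st'' := by
  obtain ⟨a1, b1, c1, d1, e1, f1, g1, i1⟩ := h1
  obtain ⟨a2, b2, c2, d2, e2, f2, g2, i2⟩ := h2
  refine ⟨fun x hx => a2 x (a1 x hx), fun h => b2 (b1 h), fun h => c2 (c1 h),
    fun k e he => d2 k e (d1 k e he), ?_, fun h => f2 (f1 h), ?_, ?_⟩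
  · intro k e he
    rcases e2 k e he with h | h
    · rcases e1 k e h with h' | h'
      · exact Or.inl h'
      · exact Or.inr h'
    · exact Or.inr h
  · intro pr hpr s hs hcond
    rcases List.mem_append.mp hpr with h | h
    · exact a2 _ (g1 pr h s hs hcond)
    · exact g2 pr h s hs hcond
  · intro pr hpr s hs hne hnall c hc
    rcases List.mem_append.mp hpr with h | h
    · exact d2 _ _ (i1 pr h s hs hne hnall c hc)
    · exact i2 pr h s hs hne hnall c hc

-- effect of processing one right-hand side s of the pair pr in the building loop
lemma pvBStep (L : List (String × List String)) (vt : List String)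
    (pr : String × List String) (hpr : pr ∈ L) (s : String) (hs : s ∈ pr.2)
    (st : PySem.Set String × List String × PySem.Dict String (List (String × List Char))) :
    pvBRel L vt [(pr.1, [s])] st
      (if s.toList.all (fun c => PySem.Set.contains (PySem.Set.ofList vt) (pvSg c)) then
        if PySem.Set.contains st.1 pr.1 then st
        else (PySem.Set.add st.1 pr.1, st.2.1 ++ [pr.1], st.2.2)
      else
        if pvBlockers (PySem.Set.ofList vt) s = [] then
          if PySem.Set.contains st.1 pr.1 then st
          else (PySem.Set.add st.1 pr.1, st.2.1 ++ [pr.1], st.2.2)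
        else (st.1, st.2.1, pvRecord pr.1 (pvBlockers (PySem.Set.ofList vt) s) st.2.2)) := by
  have hseed : pvProductive L vt pr.1 →
      (pvBlockers (PySem.Set.ofList vt) s = [] ∨
        s.toList.all (fun c => PySem.Set.contains (PySem.Set.ofList vt) (pvSg c)) = true) →
      pvBRel L vt [(pr.1, [s])] st
        (if PySem.Set.contains st.1 pr.1 then st
         else (PySem.Set.add st.1 pr.1, st.2.1 ++ [pr.1], st.2.2)) := by
    intro hP hno
    by_cases hc : PySem.Set.contains st.1 pr.1 = true
    · rw [if_pos hc]
      refine ⟨fun _ h => h, fun h => h, fun h => h, fun _ _ h => h, fun _ _ h => Or.inl h,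
        fun h => h, ?_, ?_⟩
      · intro pr' hpr' s' hs' _
        simp only [List.mem_singleton] at hpr'
        subst hpr'
        exact (PySem.Set.contains_iff _ _).mp hc
      · intro pr' hpr' s' hs' hne hnall c hcb
        simp only [List.mem_singleton] at hpr'
        subst hpr'
        simp only [List.mem_singleton] at hs'
        subst hs'
        rcases hno with h | h
        · exact absurd h hne
        · exact absurd h hnall
    · rw [if_neg hc]
      refine ⟨fun x hx => (PySem.Set.mem_add _ _ _).mpr (Or.inl hx), ?_, ?_,
        fun _ _ h => h, fun _ _ h => Or.inl h, fun h => h, ?_, ?_⟩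
      · intro hsync x
        simp only [PySem.Set.mem_add, List.mem_append, List.mem_singleton]
        rw [hsync x]
      · intro hp x hx
        rcases (PySem.Set.mem_add _ _ _).mp hx with h | rfl
        · exact hp x h
        · exact hP
      · intro pr' hpr' s' hs' _
        simp only [List.mem_singleton] at hpr'
        subst hpr'
        exact (PySem.Set.mem_add _ _ _).mpr (Or.inr rfl)
      · intro pr' hpr' s' hs' hne hnall c hcb
        simp only [List.mem_singleton] at hpr'
        subst hpr'
        simp only [List.mem_singleton] at hs'
        subst hs'
        rcases hno with h | h
        · exact absurd h hne
        · exact absurd h hnall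
  by_cases hall : s.toList.all (fun c => PySem.Set.contains (PySem.Set.ofList vt) (pvSg c)) = true
  · rw [if_pos hall]
    refine hseed (pvProductive.seed pr.1 pr.2 s (by simpa using hpr) hs ?_) (Or.inr hall)
    intro c hc
    exact (pvVts vt (pvSg c)).mp (by simpa using (List.all_eq_true.mp hall c hc))
  · rw [if_neg hall]
    by_cases hbl : pvBlockers (PySem.Set.ofList vt) s = []
    · rw [if_pos hbl]
      have hstep : pvProductive L vt pr.1 := by
        refine pvProductive.step pr.1 pr.2 s (by simpa using hpr) hs ?_
        intro c hc hcv
        exfalso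
        have : c ∈ pvBlockers (PySem.Set.ofList vt) s :=
          (pvBlockers_mem _ s c).mpr ⟨hc, (pvVts vt (pvSg c)).mpr hcv⟩
        rw [hbl] at this
        simp at this
      exact hseed hstep (Or.inl hbl)
    · rw [if_neg hbl]
      set bs := pvBlockers (PySem.Set.ofList vt) s with hbs
      refine ⟨fun _ h => h, fun h => h, fun h => h, ?_, ?_, ?_, ?_, ?_⟩
      · intro k e he
        exact pvRecord_fold_mono pr.1 bs bs st.2.2 k e he
      · intro k e he
        rcases pvRecord_fold_new pr.1 bs bs st.2.2 k e he with h | rfl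
        · exact Or.inl h
        · exact Or.inr ⟨pr, hpr, s, hs, rfl, hbs, hbl⟩
      · intro hreg k e he c hc
        rcases pvRecord_fold_new pr.1 bs bs st.2.2 k e he with h | rfl
        · exact pvRecord_fold_mono pr.1 bs bs st.2.2 _ e (hreg k e h c hc)
        · exact pvRecord_fold_reg pr.1 bs bs st.2.2 c hc
      · intro pr' hpr' s' hs' hcond
        simp only [List.mem_singleton] at hpr'
        subst hpr'
        simp only [List.mem_singleton] at hs'
        subst hs'
        rcases hcond with h | h
        · exact absurd h hall
        · exact absurd h hbl
      · intro pr' hpr' s' hs' hne hnall c hc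
        simp only [List.mem_singleton] at hpr'
        subst hpr'
        simp only [List.mem_singleton] at hs'
        subst hs'
        exact pvRecord_fold_reg pr.1 bs bs st.2.2 c hc

-- the building loop relates the empty state to its result
lemma pvBuildB_rel (L : List (String × List String)) (vt : List String) :
    pvBRel L vt L (PySem.Set.empty, [], PySem.Dict.empty) (pvBuildB L (PySem.Set.ofList vt)) := by
  unfold pvBuildB
  have inner : ∀ (pr : String × List String), pr ∈ L → ∀ (ss : List String),
      (∀ s ∈ ss, s ∈ pr.2) → ∀ st, pvBRel L vt [(pr.1, ss)] st
        (ss.foldl (fun st s =>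
          if s.toList.all (fun c => PySem.Set.contains (PySem.Set.ofList vt) (pvSg c)) then
            if PySem.Set.contains st.1 pr.1 then st
            else (PySem.Set.add st.1 pr.1, st.2.1 ++ [pr.1], st.2.2)
          else
            if pvBlockers (PySem.Set.ofList vt) s = [] then
              if PySem.Set.contains st.1 pr.1 then st
              else (PySem.Set.add st.1 pr.1, st.2.1 ++ [pr.1], st.2.2)
            else (st.1, st.2.1, pvRecord pr.1 (pvBlockers (PySem.Set.ofList vt) s) st.2.2)) st) := by
    intro pr hpr ss
    induction ss with
    | nil =>
      intro _ st
      have h := pvBRel_rfl L vt st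
      refine ⟨h.1, h.2.1, h.2.2.1, h.2.2.2.1, h.2.2.2.2.1, h.2.2.2.2.2.1, ?_, ?_⟩
      · intro pr' hpr' s' hs' _
        simp only [List.mem_singleton] at hpr'
        subst hpr'
        simp at hs'
      · intro pr' hpr' s' hs' _ _
        simp only [List.mem_singleton] at hpr'
        subst hpr'
        simp at hs'
    | cons s ss ih =>
      intro hss st
      simp only [List.foldl_cons]
      have h1 := pvBStep L vt pr hpr s (hss s (by simp)) st
      have h2 := ih (fun s' hs' => hss s' (by simp [hs']))
        (if s.toList.all (fun c => PySem.Set.contains (PySem.Set.ofList vt) (pvSg c)) then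
          if PySem.Set.contains st.1 pr.1 then st
          else (PySem.Set.add st.1 pr.1, st.2.1 ++ [pr.1], st.2.2)
        else
          if pvBlockers (PySem.Set.ofList vt) s = [] then
            if PySem.Set.contains st.1 pr.1 then st
            else (PySem.Set.add st.1 pr.1, st.2.1 ++ [pr.1], st.2.2)
          else (st.1, st.2.1, pvRecord pr.1 (pvBlockers (PySem.Set.ofList vt) s) st.2.2))
      have h12 := pvBRel_trans h1 h2
      refine ⟨h12.1, h12.2.1, h12.2.2.1, h12.2.2.2.1, h12.2.2.2.2.1, h12.2.2.2.2.2.1, ?_, ?_⟩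
      · intro pr' hpr' s' hs' hcond
        simp only [List.mem_singleton] at hpr'
        subst hpr'
        rcases List.mem_cons.mp hs' with rfl | hs''
        · exact h12.2.2.2.2.2.2.1 (pr.1, [s']) (by simp) s' (by simp) hcond
        · exact h12.2.2.2.2.2.2.1 (pr.1, ss) (by simp) s' hs'' hcond
      · intro pr' hpr' s' hs' hne hnall c hc
        simp only [List.mem_singleton] at hpr'
        subst hpr'
        rcases List.mem_cons.mp hs' with rfl | hs''
        · exact h12.2.2.2.2.2.2.2 (pr.1, [s']) (by simp) s' (by simp) hne hnall c hc
        · exact h12.2.2.2.2.2.2.2 (pr.1, ss) (by simp) s' hs'' hne hnall c hc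
  have outer : ∀ (M : List (String × List String)), (∀ pr ∈ M, pr ∈ L) →
      ∀ st, pvBRel L vt M st (M.foldl (fun st pr => pr.2.foldl (fun st s =>
        if s.toList.all (fun c => PySem.Set.contains (PySem.Set.ofList vt) (pvSg c)) then
          if PySem.Set.contains st.1 pr.1 then st
          else (PySem.Set.add st.1 pr.1, st.2.1 ++ [pr.1], st.2.2)
        else
          if pvBlockers (PySem.Set.ofList vt) s = [] then
            if PySem.Set.contains st.1 pr.1 then st
            else (PySem.Set.add st.1 pr.1, st.2.1 ++ [pr.1], st.2.2)
          else (st.1, st.2.1, pvRecord pr.1 (pvBlockers (PySem.Set.ofList vt) s) st.2.2)) st) st) := by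
    intro M
    induction M with
    | nil => exact fun _ st => pvBRel_rfl L vt st
    | cons pr M ih =>
      intro hM st
      simp only [List.foldl_cons]
      have h1 := inner pr (hM pr (by simp)) pr.2 (fun _ h => h) st
      have h2 := ih (fun q hq => hM q (by simp [hq]))
        (pr.2.foldl (fun st s =>
          if s.toList.all (fun c => PySem.Set.contains (PySem.Set.ofList vt) (pvSg c)) then
            if PySem.Set.contains st.1 pr.1 then st
            else (PySem.Set.add st.1 pr.1, st.2.1 ++ [pr.1], st.2.2)
          else
            if pvBlockers (PySem.Set.ofList vt) s = [] then
              if PySem.Set.contains st.1 pr.1 then st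
              else (PySem.Set.add st.1 pr.1, st.2.1 ++ [pr.1], st.2.2)
            else (st.1, st.2.1, pvRecord pr.1 (pvBlockers (PySem.Set.ofList vt) s) st.2.2)) st)
      have h12 := pvBRel_trans h1 h2
      refine ⟨h12.1, h12.2.1, h12.2.2.1, h12.2.2.2.1, h12.2.2.2.2.1, h12.2.2.2.2.2.1, ?_, ?_⟩
      · intro pr' hpr' s' hs' hcond
        rcases List.mem_cons.mp hpr' with rfl | hpr''
        · exact h12.2.2.2.2.2.2.1 (pr'.1, pr'.2) (by simp) s' hs' hcond
        · exact h12.2.2.2.2.2.2.1 pr' (by simp [hpr'']) s' hs' hcond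
      · intro pr' hpr' s' hs' hne hnall c hc
        rcases List.mem_cons.mp hpr' with rfl | hpr''
        · exact h12.2.2.2.2.2.2.2 (pr'.1, pr'.2) (by simp) s' hs' hne hnall c hc
        · exact h12.2.2.2.2.2.2.2 pr' (by simp [hpr'']) s' hs' hne hnall c hc
  exact outer L (fun _ h => h) _

-- the invariant: a ready-but-unfired entry always has a blocker still on the queue
def pvInvB (W : PySem.Dict String (List (String × List Char))) (P : PySem.Set String)
    (Q : List String) : Prop :=
  ∀ (k : String) (e : String × List Char), e ∈ W.getD k [] →
    (∀ c ∈ e.2, pvSg c ∈ P) → e.1 ∈ P ∨ ∃ c ∈ e.2, pvSg c ∈ Q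

-- everything one round of firings guarantees
lemma pvFireB_fold_spec (L : List (String × List String)) (vt : List String)
    (l : List (String × List Char)) : ∀ (P : PySem.Set String) (q : List String),
    (∀ x ∈ P, x ∈ (l.foldl pvFireB (P, q)).1) ∧
    (∀ y ∈ q, y ∈ (l.foldl pvFireB (P, q)).2) ∧
    (∀ x ∈ (l.foldl pvFireB (P, q)).1, x ∈ P ∨ x ∈ (l.foldl pvFireB (P, q)).2) ∧
    (∀ e ∈ l, (∀ c ∈ e.2, pvSg c ∈ P) → e.1 ∈ (l.foldl pvFireB (P, q)).1) ∧
    ((∀ e ∈ l, pvEntryOK L vt e) → (∀ x ∈ P, pvProductive L vt x) →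
      ∀ x ∈ (l.foldl pvFireB (P, q)).1, pvProductive L vt x) := by
  induction l with
  | nil =>
    intro P q
    exact ⟨fun _ h => h, fun _ h => h, fun _ h => Or.inl h, fun e he => by simp at he,
      fun _ hP => hP⟩
  | cons e l ih =>
    intro P q
    simp only [List.foldl_cons]
    by_cases hc : (!(PySem.Set.contains P e.1) &&
        e.2.all (fun c => PySem.Set.contains P (pvSg c))) = true
    · have hstep : pvFireB (P, q) e = (PySem.Set.add P e.1, q ++ [e.1]) := by
        unfold pvFireB; rw [if_pos hc]
      rw [hstep]
      obtain ⟨ih1, ih2, ih3, ih4, ih5⟩ := ih (PySem.Set.add P e.1) (q ++ [e.1])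
      have hmono : ∀ x ∈ P, x ∈ PySem.Set.add P e.1 :=
        fun x hx => (PySem.Set.mem_add _ _ _).mpr (Or.inl hx)
      have hready : ∀ c ∈ e.2, PySem.Set.contains P (pvSg c) = true :=
        fun c hcm => by simpa using List.all_eq_true.mp ((Bool.and_eq_true _ _).mp hc).2 c hcm
      refine ⟨fun x hx => ih1 x (hmono x hx), fun y hy => ih2 y (by simp [hy]), ?_, ?_, ?_⟩
      · intro x hx
        rcases ih3 x hx with h | h
        · rcases (PySem.Set.mem_add _ _ _).mp h with h' | rfl
          · exact Or.inl h'
          · exact Or.inr (ih2 e.1 (by simp))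
        · exact Or.inr h
      · intro e' he' hre
        rcases List.mem_cons.mp he' with rfl | he''
        · exact ih1 e'.1 ((PySem.Set.mem_add _ _ _).mpr (Or.inr rfl))
        · exact ih4 e' he'' (fun c hcm => hmono _ (hre c hcm))
      · intro hE hP
        refine ih5 (fun e' he' => hE e' (by simp [he'])) ?_
        intro x hx
        rcases (PySem.Set.mem_add _ _ _).mp hx with h | rfl
        · exact hP x h
        · obtain ⟨pr, hpr, s, hs, he1, he2, _⟩ := hE e (by simp)
          rw [he1]
          refine pvProductive.step pr.1 pr.2 s (by simpa using hpr) hs ?_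
          intro c hcs hcv
          have hcb : c ∈ e.2 := by
            rw [he2]
            exact (pvBlockers_mem _ s c).mpr ⟨hcs, (pvVts vt (pvSg c)).mpr hcv⟩
          exact hP _ ((PySem.Set.contains_iff _ _).mp (hready c hcb))
    · have hstep : pvFireB (P, q) e = (P, q) := by
        unfold pvFireB; rw [if_neg (by simpa using hc)]
      rw [hstep]
      obtain ⟨ih1, ih2, ih3, ih4, ih5⟩ := ih P q
      refine ⟨ih1, ih2, ih3, ?_, fun hE hP => ih5 (fun e' he' => hE e' (by simp [he'])) hP⟩
      intro e' he' hre
      rcases List.mem_cons.mp he' with rfl | he''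
      · -- not fired although ready: the owner must already be productive
        by_cases hmem : e'.1 ∈ P
        · exact ih1 e'.1 hmem
        · exfalso
          apply hc
          simp only [Bool.and_eq_true, Bool.not_eq_true']
          constructor
          · cases hcc : PySem.Set.contains P e'.1 with
            | true => exact absurd ((PySem.Set.contains_iff _ _).mp hcc) hmem
            | false => rfl
          · exact List.all_eq_true.mpr
              (fun c hcm => (PySem.Set.contains_iff _ _).mpr (hre c hcm))
      · exact ih4 e' he'' hre

lemma pvWhileB_mono (W : PySem.Dict String (List (String × List Char))) :
    ∀ (P : PySem.Set String) (Q : List String), ∀ x ∈ P, x ∈ pvWhileB W P Q := by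
  intro P Q
  induction P, Q using pvWhileB.induct W with
  | case1 P =>
    rw [pvWhileB, dif_pos rfl]
    exact fun x hx => hx
  | case2 P Q hQ ih =>
    rw [pvWhileB, dif_neg hQ]
    intro x hx
    exact ih x ((pvFireB_fold_spec [] [] (W.getD (Q.getLast hQ) []) P Q.dropLast).1 x hx)

lemma pvWhileB_sound (L : List (String × List String)) (vt : List String)
    (W : PySem.Dict String (List (String × List Char)))
    (hE : ∀ (k : String) (e : String × List Char), e ∈ W.getD k [] → pvEntryOK L vt e) :
    ∀ (P : PySem.Set String) (Q : List String), (∀ x ∈ P, pvProductive L vt x) →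
      ∀ x ∈ pvWhileB W P Q, pvProductive L vt x := by
  intro P Q
  induction P, Q using pvWhileB.induct W with
  | case1 P =>
    rw [pvWhileB, dif_pos rfl]
    exact fun h => h
  | case2 P Q hQ ih =>
    rw [pvWhileB, dif_neg hQ]
    intro hP
    refine ih ?_
    exact (pvFireB_fold_spec L vt (W.getD (Q.getLast hQ) []) P Q.dropLast).2.2.2.2
      (fun e he => hE _ e he) hP

lemma pvWhileB_closed (W : PySem.Dict String (List (String × List Char)))
    (hreg : pvWReg W) : ∀ (P : PySem.Set String) (Q : List String), pvInvB W P Q →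
    ∀ (k : String) (e : String × List Char), e ∈ W.getD k [] →
      (∀ c ∈ e.2, pvSg c ∈ pvWhileB W P Q) → e.1 ∈ pvWhileB W P Q := by
  intro P Q
  induction P, Q using pvWhileB.induct W with
  | case1 P =>
    rw [pvWhileB, dif_pos rfl]
    intro hInv k e he hready
    rcases hInv k e he hready with h | ⟨c, hc, hq⟩
    · exact h
    · simp at hq
  | case2 P Q hQ ih =>
    rw [pvWhileB, dif_neg hQ]
    intro hInv k e he hready
    obtain ⟨f1, f2, f3, f4, f5⟩ :=
      pvFireB_fold_spec [] [] (W.getD (Q.getLast hQ) []) P Q.dropLast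
    refine ih ?_ k e he hready
    -- the invariant is preserved by one round
    intro k' e' he' hready'
    by_cases hr : ∀ c ∈ e'.2, pvSg c ∈ P
    · rcases hInv k' e' he' hr with h | ⟨c, hc, hq⟩
      · exact Or.inl (f1 e'.1 h)
      · rw [← List.dropLast_append_getLast hQ, List.mem_append] at hq
        rcases hq with hq | hq
        · exact Or.inr ⟨c, hc, f2 _ hq⟩
        · simp only [List.mem_singleton] at hq
          have hew : e' ∈ W.getD (Q.getLast hQ) [] := by
            rw [← hq]
            exact hreg k' e' he' c hc
          exact Or.inl (f4 e' hew hr)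
    · simp only [not_forall] at hr
      obtain ⟨c, hc, hcP⟩ := hr
      rcases f3 _ (hready' c hc) with h | h
      · exact absurd h hcP
      · exact Or.inr ⟨c, hc, h⟩

lemma pvB_iff (L : List (String × List String)) (vt : List String) (x : String) :
    x ∈ pvWhileB (pvBuildB L (PySem.Set.ofList vt)).2.2 (pvBuildB L (PySem.Set.ofList vt)).1
        (pvBuildB L (PySem.Set.ofList vt)).2.1 ↔ pvProductive L vt x := by
  have hrel := pvBuildB_rel L vt
  obtain ⟨r1, r2, r3, r4, r5, r6, r7, r8⟩ := hrel
  have hOK : ∀ (k : String) (e : String × List Char),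
      e ∈ (pvBuildB L (PySem.Set.ofList vt)).2.2.getD k [] → pvEntryOK L vt e := by
    intro k e he
    rcases r5 k e he with h | h
    · rw [PySem.Dict.getD_empty] at h; simp at h
    · exact h
  have hsync : ∀ y : String, y ∈ (pvBuildB L (PySem.Set.ofList vt)).1 ↔
      y ∈ (pvBuildB L (PySem.Set.ofList vt)).2.1 := by
    refine r2 ?_
    intro y
    constructor <;> intro h <;> simp [PySem.Set.empty] at h
  have hreg0 : pvWReg (pvBuildB L (PySem.Set.ofList vt)).2.2 := by
    refine r6 ?_
    intro k e he
    rw [PySem.Dict.getD_empty] at he; simp at he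
  have hInv0 : pvInvB (pvBuildB L (PySem.Set.ofList vt)).2.2 (pvBuildB L (PySem.Set.ofList vt)).1
      (pvBuildB L (PySem.Set.ofList vt)).2.1 := by
    intro k e he hready
    obtain ⟨pr, hpr, s, hs, he1, he2, hne⟩ := hOK k e he
    obtain ⟨c, hc⟩ := List.exists_mem_of_ne_nil e.2 hne
    exact Or.inr ⟨c, hc, (hsync (pvSg c)).mp (hready c hc)⟩
  constructor
  · intro hx
    refine pvWhileB_sound L vt _ hOK _ _ ?_ x hx
    refine r3 ?_
    intro y hy
    simp [PySem.Set.empty] at hy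
  · intro hx
    induction hx with
    | seed p ss s hpr hs hall =>
      refine pvWhileB_mono _ _ _ p (r7 (p, ss) hpr s hs (Or.inl ?_))
      exact List.all_eq_true.mpr
        (fun c hc => by simpa using (pvVts vt (pvSg c)).mpr (hall c hc))
    | step p ss s hpr hs hprem ih =>
      by_cases hall : s.toList.all
          (fun c => PySem.Set.contains (PySem.Set.ofList vt) (pvSg c)) = true
      · exact pvWhileB_mono _ _ _ p (r7 (p, ss) hpr s hs (Or.inl hall))
      · by_cases hbl : pvBlockers (PySem.Set.ofList vt) s = []
        · exact pvWhileB_mono _ _ _ p (r7 (p, ss) hpr s hs (Or.inr hbl))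
        · obtain ⟨c0, hc0⟩ := List.exists_mem_of_ne_nil _ hbl
          have he := r8 (p, ss) hpr s hs hbl hall c0 hc0
          refine pvWhileB_closed _ hreg0 _ _ hInv0 (pvSg c0)
            (p, pvBlockers (PySem.Set.ofList vt) s) he ?_
          intro c hc
          obtain ⟨hcs, hcv⟩ := (pvBlockers_mem _ s c).mp hc
          exact ih c hcs ((pvVts vt (pvSg c)).mp hcv)

-- ===== VERDICT (by name: the statement is the Claim_ definition above) =====
theorem eliminate_non_productive_spec : Claim_equal_eliminate_non_productive := by
  intro prod vt _
  unfold Spec_eliminate_non_productive eliminate_non_productive eliminate_non_productive_alt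
  have key : ∀ x : String,
      (x ∈ pvWhileA (PySem.Dict.ofList prod).items vt (pvInitA (PySem.Dict.ofList prod).items vt)) ↔
      (PySem.Set.contains (pvWhileB (pvBuildB (PySem.Dict.ofList prod).items (PySem.Set.ofList vt)).2.2
        (pvBuildB (PySem.Dict.ofList prod).items (PySem.Set.ofList vt)).1
        (pvBuildB (PySem.Dict.ofList prod).items (PySem.Set.ofList vt)).2.1) x) = true := by
    intro x
    rw [PySem.Set.contains_iff]
    rw [pvA_iff, pvB_iff]
  simp only []
  have hfilter : ∀ pr : String × List String,
      (decide (pr.1 ∈ pvWhileA (PySem.Dict.ofList prod).items vt (pvInitA (PySem.Dict.ofList prod).items vt))) =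
      PySem.Set.contains (pvWhileB (pvBuildB (PySem.Dict.ofList prod).items (PySem.Set.ofList vt)).2.2
        (pvBuildB (PySem.Dict.ofList prod).items (PySem.Set.ofList vt)).1
        (pvBuildB (PySem.Dict.ofList prod).items (PySem.Set.ofList vt)).2.1) pr.1 := by
    intro pr
    by_cases h : pr.1 ∈ pvWhileA (PySem.Dict.ofList prod).items vt (pvInitA (PySem.Dict.ofList prod).items vt)
    · have hm := (PySem.Set.contains_iff _ _).mp ((key pr.1).mp h)
      simp [h, hm]
    · have hcf : PySem.Set.contains (pvWhileB (pvBuildB (PySem.Dict.ofList prod).items (PySem.Set.ofList vt)).2.2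
          (pvBuildB (PySem.Dict.ofList prod).items (PySem.Set.ofList vt)).1
          (pvBuildB (PySem.Dict.ofList prod).items (PySem.Set.ofList vt)).2.1) pr.1 = false := by
        cases hcc : PySem.Set.contains (pvWhileB (pvBuildB (PySem.Dict.ofList prod).items (PySem.Set.ofList vt)).2.2
            (pvBuildB (PySem.Dict.ofList prod).items (PySem.Set.ofList vt)).1
            (pvBuildB (PySem.Dict.ofList prod).items (PySem.Set.ofList vt)).2.1) pr.1 with
        | true => exact absurd ((key pr.1).mpr hcc) h
        | false => rfl
      have hnm : pr.1 ∉ pvWhileB (pvBuildB (PySem.Dict.ofList prod).items (PySem.Set.ofList vt)).2.2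
          (pvBuildB (PySem.Dict.ofList prod).items (PySem.Set.ofList vt)).1
          (pvBuildB (PySem.Dict.ofList prod).items (PySem.Set.ofList vt)).2.1 := fun hm => by
        rw [(PySem.Set.contains_iff _ _).mpr hm] at hcf
        exact Bool.true_eq_false.mp hcf
      simp [h, hnm]
  rw [List.filter_congr (fun pr _ => hfilter pr)]
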